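-- pv_equiv track=rewrite | github.com/irenepeggy/python_course | task9/bit_coding1.py | xehs
-- ===== SOURCE A (Python) =====
-- def xehs(s):
-- 	ns = [ord(x)-32 for x in s]
-- 	ns.reverse()
-- 	i = 1
-- 	res = 0
-- 	for x in ns:
-- 		res += x * i
-- 		i *= 64
-- 	return res
-- ===== SOURCE B (Python) =====
-- def xehs(s):
-- 	res = 0
-- 	for x in s:
-- 		res = res * 64 + (ord(x) - 32)
-- 	return res
-- ===== Notes on version B (the rewrite author's own statement) =====
-- stated objective: idiomatic
-- what changed: Replaces the reversed codepoint list and the explicit running power-of-64 multiplier with a single forward Horner pass (res = res*64 + (ord(x)-32)).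
import Mathlib
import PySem

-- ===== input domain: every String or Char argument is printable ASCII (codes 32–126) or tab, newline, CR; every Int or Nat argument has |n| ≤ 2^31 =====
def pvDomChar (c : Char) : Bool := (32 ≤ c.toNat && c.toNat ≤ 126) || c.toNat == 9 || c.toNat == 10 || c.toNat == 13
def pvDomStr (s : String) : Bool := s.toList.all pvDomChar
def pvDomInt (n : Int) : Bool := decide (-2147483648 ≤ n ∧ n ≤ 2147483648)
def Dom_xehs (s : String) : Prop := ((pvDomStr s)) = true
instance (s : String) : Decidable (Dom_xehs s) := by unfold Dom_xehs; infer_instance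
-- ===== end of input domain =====

-- B replaces A's reversed codepoint list and running power-of-64 multiplier with a single forward Horner pass (idiomatic, same cost).

-- ===== PORT A =====
-- ns = [ord(x)-32 for x in s]; ns.reverse(); i=1; res=0; for x in ns: res += x*i; i *= 64
def xehs (s : String) : Int :=
  let ns := s.toList.map (fun x => (x.toNat : Int) - 32)
  let ns := ns.reverse
  (ns.foldl (fun (st : Int × Int) x => (st.1 * 64, st.2 + x * st.1)) (1, 0)).2

-- ===== PORT B =====
-- res = 0; for x in s: res = res*64 + (ord(x)-32)
def xehs_alt (s : String) : Int :=
  s.toList.foldl (fun res x => res * 64 + ((x.toNat : Int) - 32)) 0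

-- ===== PRECONDITION & SPEC =====
def Spec_xehs (s : String) (out : Int) : Prop := out = xehs_alt s
instance (s : String) (out : Int) : Decidable (Spec_xehs s out) := by unfold Spec_xehs; infer_instance

-- ===== CLAIM (what is proved, stated in full; the proofs are below) =====
def Claim_equal_xehs : Prop := ∀ (s : String), Dom_xehs s → Spec_xehs s (xehs s)

-- ===== LEMMAS AND PROOFS =====

-- A's loop over a list l computes r + i * (foldr-style base-64 value of l)
theorem xehs_L1 (l : List Int) (i r : Int) :
    (l.foldl (fun (st : Int × Int) x => (st.1 * 64, st.2 + x * st.1)) (i, r)).2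
      = r + i * l.foldr (fun x acc => x + 64 * acc) 0 := by
  induction l generalizing i r with
  | nil => simp
  | cons x t ih => simp [List.foldl_cons, ih]; ring

-- shifting the foldr seed out
theorem xehs_L2 (l : List Int) (a : Int) :
    l.foldr (fun x acc => x + 64 * acc) a
      = l.foldr (fun x acc => x + 64 * acc) 0 + 64 ^ l.length * a := by
  induction l with
  | nil => simp
  | cons x t ih => simp [List.foldr_cons, ih, pow_succ]; ring

-- Horner forward foldl equals foldr over the reverse
theorem xehs_L3 (l : List Int) (r : Int) :
    l.foldl (fun res x => res * 64 + x) r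
      = r * 64 ^ l.length + l.reverse.foldr (fun x acc => x + 64 * acc) 0 := by
  induction l generalizing r with
  | nil => simp
  | cons x t ih =>
    rw [List.foldl_cons, ih, List.reverse_cons, List.foldr_append]
    simp only [List.foldr_cons, List.foldr_nil, mul_zero, add_zero, List.length_cons, pow_succ]
    rw [xehs_L2 t.reverse x, List.length_reverse]
    ring

-- ===== VERDICT (by name: the statement is the Claim_ definition above) =====
theorem xehs_spec : Claim_equal_xehs := by
  intro s _
  unfold Spec_xehs xehs xehs_alt
  rw [xehs_L1]
  have h := List.foldl_map (f := fun x : Char => ((x.toNat : Int) - 32))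
    (g := fun res x => res * 64 + x) (l := s.toList) (init := (0 : Int))
  rw [← h, xehs_L3]
  simp
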